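-- pv_equiv track=rewrite | github.com/jairodri/extract-dblabware-info | modules/compare_events.py | analyze_value_differences
-- ===== SOURCE A (Python) =====
-- from typing import Dict, List, Any, Optional, Set
--
-- def analyze_value_differences(schema_values: Dict[str, str], existing_schemas: List[str]) -> Dict[str, List[str]]:
--     """
--     Analyze value differences and group schemas by their values.
--
--     Args:
--         schema_values (Dict[str, str]): Schema name to value mapping
--         existing_schemas (List[str]): List of schemas where the event exists
--
--     Returns:
--         Dict[str, List[str]]: Dictionary mapping values to lists of schemas that have that value
--     """
--     value_groups = {}
--
--     for schema_name in existing_schemas: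
--         value = schema_values[schema_name]
--         if value not in value_groups:
--             value_groups[value] = []
--         value_groups[value].append(schema_name)
--
--     return value_groups
-- ===== SOURCE B (Python) =====
-- def analyze_value_differences(schema_values, existing_schemas):
--     # Eager lookup pass (a missing schema still raises KeyError, like A),
--     # then one comprehension per distinct value in first-occurrence order.
--     pairs = [(schema_values[s], s) for s in existing_schemas]
--     order = dict.fromkeys(v for v, _ in pairs)
--     return {v: [s for w, s in pairs if w == v] for v in order}
-- ===== Notes on version B (the rewrite author's own statement) =====
-- stated objective: alternative
-- what changed: Instead of one pass mutating a dict of lists, B materializes (value, schema) pairs, takes the distinct values in first-occurrence order via dict.fromkeys, and builds each group by a filtering comprehension over the pairs.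
import Mathlib
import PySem

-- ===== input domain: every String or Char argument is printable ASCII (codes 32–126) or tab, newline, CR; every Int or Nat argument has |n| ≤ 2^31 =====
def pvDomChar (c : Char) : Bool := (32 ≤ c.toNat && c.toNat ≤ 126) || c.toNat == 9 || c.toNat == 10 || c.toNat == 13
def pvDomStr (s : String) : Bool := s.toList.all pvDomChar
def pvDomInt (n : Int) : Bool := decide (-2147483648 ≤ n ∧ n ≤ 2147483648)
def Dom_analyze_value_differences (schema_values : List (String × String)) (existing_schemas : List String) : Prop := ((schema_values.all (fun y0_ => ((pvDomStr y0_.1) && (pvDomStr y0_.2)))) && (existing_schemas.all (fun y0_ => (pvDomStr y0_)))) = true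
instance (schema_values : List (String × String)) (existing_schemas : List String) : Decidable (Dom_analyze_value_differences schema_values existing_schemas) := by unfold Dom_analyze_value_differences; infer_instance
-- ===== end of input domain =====

-- B groups by a different decomposition (distinct values in first-occurrence order, one
-- filtering pass per value) instead of A's single pass mutating a dict of lists; same cost class.

-- ===== PORT A =====
-- Literal port of A's loop: dict lookup = first match; a missing key is Python's KeyError
-- (the `none` branch just keeps the state — those inputs are excluded by Pre_).
def analyze_value_differences (schema_values : List (String × String)) (existing_schemas : List String) : List (String × List String) :=
  (existing_schemas.foldl (fun value_groups schema_name =>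
      match schema_values.lookup schema_name with
      | none => value_groups   -- KeyError in Python; outside Pre_
      | some value =>
        let value_groups :=
          if value_groups.contains value then value_groups
          else value_groups.insert value ([] : List String)
        value_groups.modify value [] (fun l => l ++ [schema_name]))
    (PySem.Dict.empty : PySem.Dict String (List String))).items

-- ===== PORT B =====
-- Literal port of Source B: pairs, then dict.fromkeys (= PySem.Set.ofList: distinct elements in
-- first-occurrence order), then one filtering comprehension per value.
def analyze_value_differences_alt (schema_values : List (String × String)) (existing_schemas : List String) : List (String × List String) :=
  let pairs := existing_schemas.filterMap (fun s => (schema_values.lookup s).map (fun v => (v, s)))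
  let order := PySem.Set.ofList (pairs.map Prod.fst)
  order.map (fun v => (v, (pairs.filter (fun p => p.1 == v)).map Prod.snd))

-- ===== PRECONDITION & SPEC =====
-- Pre_ excludes exactly the inputs on which Python A raises KeyError: some schema in
-- existing_schemas is not a key of schema_values.
def Pre_analyze_value_differences (schema_values : List (String × String)) (existing_schemas : List String) : Prop :=
  ∀ s ∈ existing_schemas, s ∈ schema_values.map Prod.fst
instance (schema_values : List (String × String)) (existing_schemas : List String) : Decidable (Pre_analyze_value_differences schema_values existing_schemas) := by unfold Pre_analyze_value_differences; infer_instance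
def pvWitness_analyze_value_differences : (List (String × String)) × List String :=
  ([("s1", "x"), ("s2", "y"), ("s3", "x")], ["s1", "s2", "s3"])

def Spec_analyze_value_differences (schema_values : List (String × String)) (existing_schemas : List String) (out : List (String × List String)) : Prop := out = analyze_value_differences_alt schema_values existing_schemas
instance (schema_values : List (String × String)) (existing_schemas : List String) (out : List (String × List String)) : Decidable (Spec_analyze_value_differences schema_values existing_schemas out) := by unfold Spec_analyze_value_differences; infer_instance

-- ===== CLAIM (what is proved, stated in full; the proofs are below) =====
def Claim_equal_analyze_value_differences : Prop := ∀ (schema_values : List (String × String)) (existing_schemas : List String), Dom_analyze_value_differences schema_values existing_schemas → Pre_analyze_value_differences schema_values existing_schemas → Spec_analyze_value_differences schema_values existing_schemas (analyze_value_differences schema_values existing_schemas)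

-- ===== LEMMAS AND PROOFS =====

-- A's step ("insert [] if absent, then append") is exactly `modify` with default [].
theorem step_eq_modify (d : PySem.Dict String (List String)) (v : String) (s : String) :
    (if d.contains v then d else d.insert v ([] : List String)).modify v [] (fun l => l ++ [s])
      = d.modify v [] (fun l => l ++ [s]) := by
  by_cases h : d.contains v = true
  · simp [h]
  · simp only [h, if_neg, Bool.not_eq_true]
    simp only [PySem.Dict.modify]
    rw [PySem.Dict.getD_insert_self, PySem.Dict.insert_insert_self,
      PySem.Dict.getD_of_not_contains d ([] : List String) (by simpa using h)]

-- A's fold over existing_schemas equals the same fold over the successful-lookup pairs.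
theorem foldl_lookup_eq_foldl_pairs (sv : List (String × String)) (es : List String)
    (G : PySem.Dict String (List String) → (String × String) → PySem.Dict String (List String))
    (init : PySem.Dict String (List String)) :
    es.foldl (fun g s =>
        match sv.lookup s with
        | none => g
        | some v => G g (v, s)) init
      = (es.filterMap (fun s => (sv.lookup s).map (fun v => (v, s)))).foldl G init := by
  induction es generalizing init with
  | nil => rfl
  | cons s es ih =>
    simp only [List.foldl_cons, List.filterMap_cons]
    cases h : sv.lookup s with
    | none => simpa [h] using ih init
    | some v => simpa [h] using ih (G init (v, s))

theorem analyze_eq (sv : List (String × String)) (es : List String) :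
    analyze_value_differences sv es = analyze_value_differences_alt sv es := by
  unfold analyze_value_differences analyze_value_differences_alt
  rw [foldl_lookup_eq_foldl_pairs sv es
      (fun g p => (if g.contains p.1 then g else g.insert p.1 ([] : List String)).modify p.1 []
        (fun l => l ++ [p.2]))]
  set pairs := es.filterMap (fun s => (sv.lookup s).map (fun v => (v, s))) with hp
  have hstep : (pairs.foldl (fun g p =>
      (if g.contains p.1 then g else g.insert p.1 ([] : List String)).modify p.1 []
        (fun l => l ++ [p.2])) PySem.Dict.empty)
      = pairs.foldl (fun g p => g.modify p.1 [] (fun l => l ++ [p.2])) PySem.Dict.empty := by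
    exact PySem.List.foldl_congr_mem pairs _ _ _ (fun g p _ => step_eq_modify g p.1 p.2)
  rw [hstep]
  set D := pairs.foldl (fun g p => g.modify p.1 [] (fun l => l ++ [p.2])) PySem.Dict.empty with hD
  have hnd : D.keys.Nodup := by
    rw [hD]
    exact PySem.Dict.nodup_keys_foldl_modify_key pairs Prod.fst [] (fun _ p l => l ++ [p.2]) _
      PySem.Dict.nodup_keys_empty
  have hkeys : D.keys = PySem.Set.ofList (pairs.map Prod.fst) := by
    rw [hD, PySem.Dict.keys_foldl_modify_key pairs Prod.fst [] (fun _ p l => l ++ [p.2]),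
      PySem.Dict.keys_empty, PySem.Set.update_nil_left]
  have hget : ∀ c, D.getD c [] = (pairs.filter (fun p => p.1 == c)).map Prod.snd := by
    intro c
    rw [hD, PySem.Dict.getD_foldl_modify_append pairs PySem.Dict.empty c, PySem.Dict.getD_empty]
    simp
  rw [PySem.Dict.items_eq_map_keys D hnd [], hkeys]
  exact List.map_congr_left (fun v _ => by rw [hget v])

-- ===== VERDICT (by name: the statement is the Claim_ definition above) =====
theorem analyze_value_differences_spec : Claim_equal_analyze_value_differences := by
  intro sv es _ _
  unfold Spec_analyze_value_differences
  exact analyze_eq sv es
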